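-- pv_equiv track=rewrite | github.com/S3nna13/Aurelius | src/training/curriculum_transition.py | stage_from_transition
-- ===== SOURCE A (Python) =====
-- def stage_from_transition(step: int, boundaries: list[int]) -> int:
--     """Return the active curriculum stage index from sorted boundaries."""
--     if boundaries != sorted(boundaries):
--         raise ValueError("boundaries must be sorted")
--     stage = 0
--     for boundary in boundaries:
--         if step >= boundary:
--             stage += 1
--     return stage
-- ===== SOURCE B (Python) =====
-- def stage_from_transition(step: int, boundaries: list[int]) -> int:
--     """Return the active curriculum stage index from sorted boundaries."""
--     if boundaries != sorted(boundaries):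
--         raise ValueError("boundaries must be sorted")
--     # binary search (bisect-right) over the sorted boundaries: the number of
--     # boundaries <= step is the first index whose boundary exceeds step
--     lo, hi = 0, len(boundaries)
--     while lo < hi:
--         mid = (lo + hi) // 2
--         if step < boundaries[mid]:
--             hi = mid
--         else:
--             lo = mid + 1
--     return lo
-- ===== Notes on version B (the rewrite author's own statement) =====
-- stated objective: alternative
-- what changed: The linear counting loop over all boundaries is replaced by a binary search (bisect-right) over the already-validated sorted list, returning the first index whose boundary exceeds step; the O(n log n) sortedness validation is kept, so overall cost is similar.
import Mathlib
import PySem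

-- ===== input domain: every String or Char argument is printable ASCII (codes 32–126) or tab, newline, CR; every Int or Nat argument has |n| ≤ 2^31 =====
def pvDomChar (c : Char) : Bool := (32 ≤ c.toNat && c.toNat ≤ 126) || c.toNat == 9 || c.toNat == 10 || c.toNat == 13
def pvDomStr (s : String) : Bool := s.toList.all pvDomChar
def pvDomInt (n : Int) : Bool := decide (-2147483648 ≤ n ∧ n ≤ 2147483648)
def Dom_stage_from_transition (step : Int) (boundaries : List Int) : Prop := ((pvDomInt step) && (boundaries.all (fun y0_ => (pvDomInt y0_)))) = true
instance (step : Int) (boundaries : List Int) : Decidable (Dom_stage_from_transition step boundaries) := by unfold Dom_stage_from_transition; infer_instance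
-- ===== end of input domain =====

-- B replaces A's linear counting loop by a binary search over the sorted list (same validation, same result).

-- ===== PORT A =====
-- Python A raises ValueError when boundaries ≠ sorted(boundaries); Pre_ excludes exactly those inputs
-- (the value 0 in that branch is never claimed about).
def stage_from_transition (step : Int) (boundaries : List Int) : Int :=
  if boundaries ≠ PySem.List.sorted boundaries (fun b => b) false then 0
  else boundaries.foldl (fun stage boundary => if step ≥ boundary then stage + 1 else stage) 0

-- ===== PORT B =====
-- the while-loop of Source B: lo/hi binary search, decreasing on hi - lo
def bsLoop (xs : List Int) (step : Int) (lo hi : Nat) : Nat :=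
  if h : lo < hi then
    let mid := (lo + hi) / 2
    if step < xs.getD mid 0 then bsLoop xs step lo mid
    else bsLoop xs step (mid + 1) hi
  else lo
termination_by hi - lo
decreasing_by all_goals omega

def stage_from_transition_alt (step : Int) (boundaries : List Int) : Int :=
  if boundaries ≠ PySem.List.sorted boundaries (fun b => b) false then 0
  else (bsLoop boundaries step 0 boundaries.length : Int)

-- ===== PRECONDITION & SPEC =====
-- Pre_ excludes exactly the inputs on which Python A raises ValueError (unsorted boundaries);
-- both Pythons raise there, so nothing is claimed about those inputs.
def Pre_stage_from_transition (step : Int) (boundaries : List Int) : Prop :=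
  boundaries = PySem.List.sorted boundaries (fun b => b) false
instance (step : Int) (boundaries : List Int) : Decidable (Pre_stage_from_transition step boundaries) := by
  unfold Pre_stage_from_transition; infer_instance

def pvWitness_stage_from_transition : Int × List Int := (5, [1, 3, 7])

def Spec_stage_from_transition (step : Int) (boundaries : List Int) (out : Int) : Prop := out = stage_from_transition_alt step boundaries
instance (step : Int) (boundaries : List Int) (out : Int) : Decidable (Spec_stage_from_transition step boundaries out) := by unfold Spec_stage_from_transition; infer_instance

-- ===== CLAIM (what is proved, stated in full; the proofs are below) =====
def Claim_equal_stage_from_transition : Prop := ∀ (step : Int) (boundaries : List Int), Dom_stage_from_transition step boundaries → Pre_stage_from_transition step boundaries → Spec_stage_from_transition step boundaries (stage_from_transition step boundaries)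

-- ===== LEMMAS AND PROOFS =====

-- A's loop counts the boundaries ≤ step
theorem foldl_count (step : Int) (xs : List Int) (c : Int) :
    xs.foldl (fun stage boundary => if step ≥ boundary then stage + 1 else stage) c
      = c + (xs.countP (fun b => decide (step ≥ b)) : Int) := by
  induction xs generalizing c with
  | nil => simp
  | cons x xs ih =>
    simp only [List.foldl_cons, List.countP_cons, ih]
    by_cases h : step ≥ x <;> simp [h] <;> ring

-- the binary search returns an index k splitting xs into a prefix ≤ step and a suffix > step
theorem bsLoop_spec (xs : List Int) (step : Int)
    (hs : xs.Pairwise (· ≤ ·)) :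
    ∀ lo hi, lo ≤ hi → hi ≤ xs.length →
      (∀ j (hj : j < xs.length), j < lo → xs[j] ≤ step) →
      (∀ j (hj : j < xs.length), hi ≤ j → step < xs[j]) →
      bsLoop xs step lo hi ≤ xs.length ∧
      (∀ j (hj : j < xs.length), j < bsLoop xs step lo hi → xs[j] ≤ step) ∧
      (∀ j (hj : j < xs.length), bsLoop xs step lo hi ≤ j → step < xs[j]) := by
  intro lo hi
  induction lo, hi using bsLoop.induct xs step with
  | case1 lo hi h mid hlt ih =>
    intro hle hlen hpre hsuf
    have hmid : mid < xs.length := by simp only [mid]; omega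
    have hlt' : step < xs.getD ((lo + hi) / 2) 0 := hlt
    rw [bsLoop, dif_pos h, if_pos hlt']
    apply ih (by simp only [mid]; omega) (by omega) hpre
    intro j hj hmj
    have hx : xs.getD mid 0 = xs[mid] := List.getD_eq_getElem xs 0 hmid
    rcases Nat.eq_or_lt_of_le hmj with h1 | h1
    · subst h1; rwa [hx] at hlt
    · exact lt_of_lt_of_le (hx ▸ hlt) ((List.pairwise_iff_getElem.mp hs) mid j hmid hj h1)
  | case2 lo hi h mid hlt ih =>
    intro hle hlen hpre hsuf
    have hmid : mid < xs.length := by simp only [mid]; omega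
    have hx : xs.getD mid 0 = xs[mid] := List.getD_eq_getElem xs 0 hmid
    have hlt' : ¬ step < xs.getD ((lo + hi) / 2) 0 := hlt
    rw [bsLoop, dif_pos h, if_neg hlt']
    apply ih (by simp only [mid]; omega) (by omega) ?_ hsuf
    intro j hj hmj
    rcases Nat.lt_or_ge j mid with h1 | h1
    · exact le_trans ((List.pairwise_iff_getElem.mp hs) j mid hj hmid h1) (by rw [hx] at hlt; omega)
    · have : j = mid := by omega
      subst this; rw [hx] at hlt; omega
  | case3 lo hi h =>
    intro hle hlen hpre hsuf
    rw [bsLoop, dif_neg h]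
    refine ⟨by omega, fun j hj hjlo => hpre j hj (by omega), fun j hj hloj => hsuf j hj (by omega)⟩

-- counting the elements ≤ step in a list split at such a k gives exactly k
theorem countP_eq_of_split (xs : List Int) (step : Int) (k : Nat)
    (hk : k ≤ xs.length)
    (hpre : ∀ j (hj : j < xs.length), j < k → xs[j] ≤ step)
    (hsuf : ∀ j (hj : j < xs.length), k ≤ j → step < xs[j]) :
    xs.countP (fun b => decide (step ≥ b)) = k := by
  rw [← List.take_append_drop k xs, List.countP_append]
  have h1 : (xs.take k).countP (fun b => decide (step ≥ b)) = k := by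
    rw [List.countP_eq_length.mpr, List.length_take, Nat.min_eq_left hk]
    intro a ha
    obtain ⟨i, hi, rfl⟩ := List.mem_iff_getElem.mp ha
    have hi' : i < k ∧ i < xs.length := by have := hi; simp [List.length_take] at this; omega
    have hix : i < xs.length := hi'.2
    rw [List.getElem_take]
    exact decide_eq_true (hpre i hix hi'.1)
  have h2 : (xs.drop k).countP (fun b => decide (step ≥ b)) = 0 := by
    rw [List.countP_eq_zero]
    intro a ha
    obtain ⟨i, hi, rfl⟩ := List.mem_iff_getElem.mp ha
    have hix : k + i < xs.length := by have := hi; simp [List.length_drop] at this; omega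
    rw [List.getElem_drop]
    have := hsuf (k + i) hix (by omega)
    simp; omega
  simp [h1, h2]

-- ===== VERDICT (by name: the statement is the Claim_ definition above) =====
theorem stage_from_transition_spec : Claim_equal_stage_from_transition := by
  intro step boundaries _hdom hpre
  unfold Spec_stage_from_transition stage_from_transition stage_from_transition_alt
  have hpre' : boundaries = PySem.List.sorted boundaries (fun b => b) false := hpre
  rw [if_neg (by simpa using hpre'), if_neg (by simpa using hpre')]
  have hs : boundaries.Pairwise (· ≤ ·) := by
    have := PySem.List.sorted_pairwise (xs := boundaries) (key := fun b => b)
    rw [← hpre'] at this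
    exact this
  obtain ⟨hk, hp, hq⟩ :=
    bsLoop_spec boundaries step hs 0 boundaries.length (Nat.zero_le _) le_rfl
      (fun j hj hlt => absurd hlt (Nat.not_lt_zero j)) (fun j hj hge => absurd hj (by omega))
  rw [foldl_count, countP_eq_of_split boundaries step _ hk hp hq]
  simp
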